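-- pv_equiv track=rewrite | github.com/clickfreak/unbound-rewrite-python-module | rewrite_ip.py | unpackNAME
-- ===== SOURCE A (Python) =====
-- def unpackNAME(strNAME):
--     lbl_remain = ord(strNAME[2])
--     name = ""
--     for c in strNAME[3:]:
--         if lbl_remain == 0:
--             name += "."
--             lbl_remain = ord(c)
--             continue
--         lbl_remain -= 1
--         name += c
--     return name
-- ===== SOURCE B (Python) =====
-- def unpackNAME(strNAME):
--     L = ord(strNAME[2])
--     i = 3
--     parts = []
--     while True:
--         parts.append(strNAME[i:i + L])
--         pos = i + L
--         if pos >= len(strNAME):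
--             break
--         L = ord(strNAME[pos])
--         i = pos + 1
--     return ".".join(parts)
-- ===== Notes on version B (the rewrite author's own statement) =====
-- stated objective: faster
-- what changed: B parses label-by-label: it jumps by the length byte, slices each whole label out, and joins the labels with a dot separator, instead of A's char-by-char scan with a decrementing counter and repeated string concatenation.
import Mathlib
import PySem

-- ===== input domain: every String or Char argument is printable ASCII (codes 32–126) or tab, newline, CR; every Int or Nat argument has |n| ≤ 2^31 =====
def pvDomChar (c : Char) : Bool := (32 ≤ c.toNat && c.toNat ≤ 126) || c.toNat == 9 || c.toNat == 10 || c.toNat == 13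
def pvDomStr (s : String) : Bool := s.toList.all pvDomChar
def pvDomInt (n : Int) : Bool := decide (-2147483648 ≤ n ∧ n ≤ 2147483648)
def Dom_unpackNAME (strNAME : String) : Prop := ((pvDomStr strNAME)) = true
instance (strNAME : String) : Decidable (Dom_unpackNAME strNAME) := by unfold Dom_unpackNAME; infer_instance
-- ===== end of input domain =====

-- B parses label-by-label (jump by length byte, slice out each label, join with a dot)
-- instead of A's char-by-char scan with a decrementing counter; same return value; a timing run measured B faster (slicing + join instead of repeated concatenation).

-- ===== PORT A =====
-- char-by-char loop: state (lbl_remain, name); lbl_remain never goes negative in Python,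
-- so Nat mirrors the Python int exactly.
def unpackStepA (st : Nat × List Char) (c : Char) : Nat × List Char :=
  if st.1 = 0 then (c.toNat, st.2 ++ ['.'])
  else (st.1 - 1, st.2 ++ [c])

def unpackNAME (strNAME : String) : String :=
  match PySem.Str.pyGet? strNAME 2 with
  | none => ""   -- Python raises IndexError here; excluded by Pre_unpackNAME
  | some c2 =>
    let rest := strNAME.toList.drop 3   -- strNAME[3:]
    (String.ofList (rest.foldl unpackStepA (c2.toNat, [])).2)

-- ===== PORT B =====
-- label loop: take L chars (slice auto-caps), drop them; stop when nothing follows,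
-- else read the next length byte and recurse.  Mirrors Source B's `while True` loop.
def unpackLabels (L : Nat) (rest : List Char) : List (List Char) :=
  if h : rest.drop L = [] then [rest.take L]
  else rest.take L :: unpackLabels (((rest.drop L).head h).toNat) ((rest.drop L).tail)
termination_by rest.length
decreasing_by
  have h2 : L < rest.length := by simpa using h
  simp only [List.length_tail, List.length_drop]; omega

def unpackNAME_alt (strNAME : String) : String :=
  match PySem.Str.pyGet? strNAME 2 with
  | none => ""   -- Source B raises IndexError here too; excluded by Pre_unpackNAME
  | some c2 =>
    String.ofList (List.intercalate ['.'] (unpackLabels c2.toNat (strNAME.toList.drop 3)))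

-- ===== PRECONDITION & SPEC =====
-- Pre_: both programs raise IndexError (ord(strNAME[2])) on strings shorter than 3.
def Pre_unpackNAME (strNAME : String) : Prop := 3 ≤ strNAME.toList.length
instance (strNAME : String) : Decidable (Pre_unpackNAME strNAME) := by unfold Pre_unpackNAME; infer_instance

def pvWitness_unpackNAME : String := "xx\tarpanetnet"

def Spec_unpackNAME (strNAME : String) (out : String) : Prop := out = unpackNAME_alt strNAME
instance (strNAME : String) (out : String) : Decidable (Spec_unpackNAME strNAME out) := by unfold Spec_unpackNAME; infer_instance

-- ===== CLAIM (what is proved, stated in full; the proofs are below) =====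
def Claim_equal_unpackNAME : Prop := ∀ (strNAME : String), Dom_unpackNAME strNAME → Pre_unpackNAME strNAME → Spec_unpackNAME strNAME (unpackNAME strNAME)

-- ===== LEMMAS AND PROOFS =====

theorem ic1 (a : List Char) : List.intercalate ['.'] [a] = a := by
  simp [List.intercalate]

theorem ic2 (a b : List Char) (l : List (List Char)) :
    List.intercalate ['.'] (a :: b :: l) = a ++ '.' :: List.intercalate ['.'] (b :: l) := by
  simp [List.intercalate]

theorem unpackLabels_ne_nil (L : Nat) (rest : List Char) : unpackLabels L rest ≠ [] := by
  rw [unpackLabels]; split <;> simp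

-- the key invariant: A's fold from state (L, nm) produces nm ++ the joined labels of B's loop
theorem fold_eq_labels (rest : List Char) (L : Nat) (nm : List Char) :
    (rest.foldl unpackStepA (L, nm)).2 = nm ++ List.intercalate ['.'] (unpackLabels L rest) := by
  induction rest generalizing L nm with
  | nil =>
      rw [unpackLabels]
      simp [ic1]
  | cons c t ih =>
      by_cases hL : L = 0
      · subst hL
        rw [List.foldl_cons]
        show (t.foldl unpackStepA (unpackStepA (0, nm) c)).2 = _
        rw [show unpackStepA (0, nm) c = (c.toNat, nm ++ ['.']) from by simp [unpackStepA]]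
        rw [ih]
        rw [show unpackLabels 0 (c :: t) = [] :: unpackLabels c.toNat t from by
          rw [unpackLabels]; simp]
        rcases h : unpackLabels c.toNat t with _ | ⟨p, ps⟩
        · exact absurd h (unpackLabels_ne_nil _ _)
        · rw [ic2]; simp
      · obtain ⟨K, rfl⟩ : ∃ K, L = K + 1 := ⟨L - 1, by omega⟩
        rw [List.foldl_cons]
        show (t.foldl unpackStepA (unpackStepA (K + 1, nm) c)).2 = _
        rw [show unpackStepA (K + 1, nm) c = (K, nm ++ [c]) from by simp [unpackStepA]]
        rw [ih]
        by_cases hd : t.drop K = []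
        · rw [show unpackLabels (K + 1) (c :: t) = [c :: t.take K] from by
            rw [unpackLabels]; simp [hd]]
          rw [show unpackLabels K t = [t.take K] from by rw [unpackLabels]; simp [hd]]
          rw [ic1, ic1]; simp
        · rw [show unpackLabels (K + 1) (c :: t)
              = (c :: t.take K) :: unpackLabels (((t.drop K).head hd).toNat) ((t.drop K).tail) from by
            rw [unpackLabels]; simp [hd]]
          rw [show unpackLabels K t
              = (t.take K) :: unpackLabels (((t.drop K).head hd).toNat) ((t.drop K).tail) from by
            rw [unpackLabels]; simp [hd]]
          rcases h : unpackLabels (((t.drop K).head hd).toNat) ((t.drop K).tail) with _ | ⟨p, ps⟩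
          · exact absurd h (unpackLabels_ne_nil _ _)
          · rw [ic2, ic2]; simp
-- ===== VERDICT (by name: the statement is the Claim_ definition above) =====
theorem unpackNAME_spec : Claim_equal_unpackNAME := by
  intro s _ hpre
  unfold Spec_unpackNAME unpackNAME unpackNAME_alt
  have h2 : PySem.Str.pyGet? s 2 = s.toList[2]? := by
    simpa using PySem.Str.pyGet?_natCast s 2
  rcases hget : s.toList[2]? with _ | c
  · exfalso
    have := List.getElem?_eq_none_iff.mp hget
    unfold Pre_unpackNAME at hpre; omega
  · rw [h2, hget]
    simp only
    rw [fold_eq_labels]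
    simp
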